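-- pv_equiv track=rewrite | github.com/landoflord/Python-practice | Poly_sep/poly_sep.py | x_input_generator
-- ===== SOURCE A (Python) =====
-- def x_input_generator (logic_value:int, var_counter: int, counter_etalon: int, output, prefix=None):
--     """ Функция генерирует значения переменных для дискрутных функций по значности логики и
--         количеству переменных
--     """
--     prefix = prefix or []
--     if var_counter == 0:
--         if len(prefix) == counter_etalon:
--             output.append(tuple(prefix))
--         return output
--     for digit in range(logic_value):
--         prefix.append(digit)
--         x_input_generator(logic_value, var_counter-1, counter_etalon, output, prefix)
--         prefix.pop()
--     return output
-- ===== SOURCE B (Python) =====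
-- def x_input_generator(logic_value: int, var_counter: int, counter_etalon: int, output, prefix=None):
--     """Iterative odometer enumeration: decode each index 0..width**var_counter-1
--     into base-`width` digits instead of recursing; appends to `output` in place."""
--     base = tuple(prefix or [])
--     if var_counter < 0 or len(base) + var_counter != counter_etalon:
--         return output
--     width = max(logic_value, 0)
--     for n in range(width ** var_counter):
--         combo = []
--         for _ in range(var_counter):
--             n, d = divmod(n, width)
--             combo.append(d)
--         combo.reverse()
--         output.append(base + tuple(combo))
--     return output
-- ===== Notes on version B (the rewrite author's own statement) =====
-- stated objective: alternative
-- what changed: Replaces the recursive append/pop DFS with one up-front length guard plus a single iterative odometer loop that decodes each index 0..width**var_counter-1 into its base-width digit tuple.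
import Mathlib
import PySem

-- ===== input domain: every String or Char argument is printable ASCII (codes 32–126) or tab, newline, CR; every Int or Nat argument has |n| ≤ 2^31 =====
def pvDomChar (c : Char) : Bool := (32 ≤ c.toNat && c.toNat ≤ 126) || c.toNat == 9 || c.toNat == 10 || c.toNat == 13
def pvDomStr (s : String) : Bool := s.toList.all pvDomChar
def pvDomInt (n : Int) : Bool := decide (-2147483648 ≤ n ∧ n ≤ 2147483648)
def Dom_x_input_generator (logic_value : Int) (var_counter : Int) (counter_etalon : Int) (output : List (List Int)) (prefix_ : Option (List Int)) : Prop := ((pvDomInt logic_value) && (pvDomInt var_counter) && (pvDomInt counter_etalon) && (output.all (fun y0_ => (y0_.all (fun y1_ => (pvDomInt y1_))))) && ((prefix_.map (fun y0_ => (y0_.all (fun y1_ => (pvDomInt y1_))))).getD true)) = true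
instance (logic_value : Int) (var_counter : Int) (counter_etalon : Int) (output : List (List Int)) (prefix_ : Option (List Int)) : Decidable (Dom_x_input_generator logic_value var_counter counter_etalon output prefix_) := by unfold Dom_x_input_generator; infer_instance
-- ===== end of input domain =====

-- B replaces A's recursive append/pop DFS with one length guard and an iterative odometer
-- loop decoding each index into base-`width` digits (objective: alternative; equivalence is
-- about the return value; both Pythons append to `output` in place identically).

-- ===== PORT A =====
-- fuel = var_counter.toNat: exact for var_counter ≥ 0; the fuel-0 cut is reached otherwise
-- only where Python's loop body never runs (logic_value ≤ 0) or Python diverges (outside Pre_).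
def xigAux (fuel : Nat) (logic_value : Int) (var_counter : Int) (counter_etalon : Int)
    (output : List (List Int)) (prefix_ : List Int) : List (List Int) :=
  if var_counter = 0 then
    if (prefix_.length : Int) = counter_etalon then output ++ [prefix_] else output
  else
    match fuel with
    | 0 => output
    | fuel' + 1 =>
      (PySem.List.pyRange 0 logic_value 1).foldl
        (fun out digit =>
          xigAux fuel' logic_value (var_counter - 1) counter_etalon out (prefix_ ++ [digit]))
        output

def x_input_generator (logic_value : Int) (var_counter : Int) (counter_etalon : Int) (output : List (List Int)) (prefix_ : Option (List Int)) : List (List Int) :=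
  xigAux var_counter.toNat logic_value var_counter counter_etalon output (prefix_.getD [])

-- ===== PORT B =====
def x_input_generator_alt (logic_value : Int) (var_counter : Int) (counter_etalon : Int) (output : List (List Int)) (prefix_ : Option (List Int)) : List (List Int) :=
  let base := prefix_.getD []
  if var_counter < 0 ∨ (base.length : Int) + var_counter ≠ counter_etalon then output
  else
    let width := max logic_value 0
    (PySem.List.pyRange 0 (width ^ var_counter.toNat) 1).foldl
      (fun out n =>
        let st := (List.range var_counter.toNat).foldl
          (fun (st : Int × List Int) _ =>
            (PySem.Int.floordiv st.1 width, st.2 ++ [PySem.Int.mod st.1 width]))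
          (n, [])
        out ++ [base ++ st.2.reverse])
      output

-- ===== PRECONDITION & SPEC =====
-- Pre_ excludes only var_counter < 0 with logic_value ≥ 1, where A's recursion never
-- reaches var_counter == 0 and raises RecursionError.
def Pre_x_input_generator (logic_value : Int) (var_counter : Int) (counter_etalon : Int) (output : List (List Int)) (prefix_ : Option (List Int)) : Prop :=
  0 ≤ var_counter ∨ logic_value ≤ 0
instance (logic_value : Int) (var_counter : Int) (counter_etalon : Int) (output : List (List Int)) (prefix_ : Option (List Int)) : Decidable (Pre_x_input_generator logic_value var_counter counter_etalon output prefix_) := by unfold Pre_x_input_generator; infer_instance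
def pvWitness_x_input_generator : Int × Int × Int × List (List Int) × Option (List Int) := (2, 2, 2, [], none)

def Spec_x_input_generator (logic_value : Int) (var_counter : Int) (counter_etalon : Int) (output : List (List Int)) (prefix_ : Option (List Int)) (out : List (List Int)) : Prop := out = x_input_generator_alt logic_value var_counter counter_etalon output prefix_
instance (logic_value : Int) (var_counter : Int) (counter_etalon : Int) (output : List (List Int)) (prefix_ : Option (List Int)) (out : List (List Int)) : Decidable (Spec_x_input_generator logic_value var_counter counter_etalon output prefix_ out) := by unfold Spec_x_input_generator; infer_instance

-- ===== CLAIM (what is proved, stated in full; the proofs are below) =====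
def Claim_equal_x_input_generator : Prop := ∀ (logic_value : Int) (var_counter : Int) (counter_etalon : Int) (output : List (List Int)) (prefix_ : Option (List Int)), Dom_x_input_generator logic_value var_counter counter_etalon output prefix_ → Pre_x_input_generator logic_value var_counter counter_etalon output prefix_ → Spec_x_input_generator logic_value var_counter counter_etalon output prefix_ (x_input_generator logic_value var_counter counter_etalon output prefix_)

-- ===== LEMMAS AND PROOFS =====

-- least-significant-first base-w digits, as B's inner loop produces them
def pvLsd : Nat → Int → Int → List Int
  | 0, _, _ => []
  | k+1, n, w => PySem.Int.mod n w :: pvLsd k (PySem.Int.floordiv n w) w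

-- all prefix-extended combinations, in A's DFS order
def pvCombos (w : Int) : Nat → List Int → List (List Int)
  | 0, p => [p]
  | k+1, p => (PySem.List.pyRange 0 w 1).flatMap (fun d => pvCombos w k (p ++ [d]))

theorem pv_foldl_const {α β : Type} (xs : List β) (init : α) :
    xs.foldl (fun a _ => a) init = init := by
  induction xs generalizing init with
  | nil => rfl
  | cons x xs ih => simpa using ih init

theorem pv_fold_lsd (w : Int) (k : Nat) : ∀ (n : Int) (acc : List Int),
    ((List.range k).foldl
      (fun (st : Int × List Int) _ =>
        (PySem.Int.floordiv st.1 w, st.2 ++ [PySem.Int.mod st.1 w])) (n, acc)).2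
      = acc ++ pvLsd k n w := by
  induction k with
  | zero => intro n acc; simp [pvLsd]
  | succ k ih =>
    intro n acc
    rw [List.range_succ_eq_map, List.foldl_cons, List.foldl_map]
    simpa [pvLsd] using ih (PySem.Int.floordiv n w) (acc ++ [PySem.Int.mod n w])

theorem pv_lsd_split (w : Int) (hw : 0 < w) (k : Nat) : ∀ d m : Int, 0 ≤ d → d < w → 0 ≤ m → m < w ^ k →
    pvLsd (k+1) (d * w ^ k + m) w = pvLsd k m w ++ [d] := by
  induction k with
  | zero =>
    intro d m hd hdw hm hmk
    have hm0 : m = 0 := by simp only [pow_zero] at hmk; omega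
    subst hm0
    simp only [pow_zero, mul_one, add_zero, pvLsd, List.nil_append]
    rw [PySem.Int.mod_eq_emod_of_pos hw, Int.emod_eq_of_lt hd hdw]
  | succ k ih =>
    intro d m hd hdw hm hmk
    have hwk : (0:Int) < w ^ k := pow_pos hw k
    have hsplit : d * w ^ (k+1) + m = m + d * w ^ k * w := by ring
    have h1 : PySem.Int.mod (d * w ^ (k+1) + m) w = PySem.Int.mod m w := by
      rw [PySem.Int.mod_eq_emod_of_pos hw, PySem.Int.mod_eq_emod_of_pos hw, hsplit,
        Int.add_mul_emod_self_right]
    have h2 : PySem.Int.floordiv (d * w ^ (k+1) + m) w = d * w ^ k + PySem.Int.floordiv m w := by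
      rw [PySem.Int.floordiv_eq_ediv_of_pos hw, PySem.Int.floordiv_eq_ediv_of_pos hw, hsplit,
        Int.add_mul_ediv_right _ _ (ne_of_gt hw)]
      ring
    have hq0 : 0 ≤ PySem.Int.floordiv m w := by
      rw [PySem.Int.floordiv_eq_ediv_of_pos hw]; exact Int.ediv_nonneg hm (le_of_lt hw)
    have hqk : PySem.Int.floordiv m w < w ^ k := by
      rw [PySem.Int.floordiv_eq_ediv_of_pos hw, Int.ediv_lt_iff_lt_mul hw]
      calc m < w ^ (k+1) := hmk
        _ = w ^ k * w := pow_succ w k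
    show PySem.Int.mod (d * w ^ (k+1) + m) w ::
        pvLsd (k+1) (PySem.Int.floordiv (d * w ^ (k+1) + m) w) w = _
    rw [h1, h2, ih d (PySem.Int.floordiv m w) hd hdw hq0 hqk]
    show PySem.Int.mod m w :: (pvLsd k (PySem.Int.floordiv m w) w ++ [d]) = _
    rfl

theorem pv_range_mul_nat (a b : Nat) :
    List.range (a*b) = (List.range a).flatMap (fun d => (List.range b).map (fun m => d*b + m)) := by
  induction a with
  | zero => simp
  | succ a ih =>
    rw [Nat.succ_mul, List.range_add, ih, List.range_succ, List.flatMap_append]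
    simp

theorem pv_pyRange_mul (w s : Int) (hw : 0 ≤ w) (hs : 0 ≤ s) :
    PySem.List.pyRange 0 (w*s) 1 =
      (PySem.List.pyRange 0 w 1).flatMap (fun d => (PySem.List.pyRange 0 s 1).map (fun m => d * s + m)) := by
  rw [PySem.List.pyRange_one, PySem.List.pyRange_one, PySem.List.pyRange_one]
  simp only [sub_zero, zero_add]
  rw [show (w*s).toNat = w.toNat * s.toNat from Int.toNat_mul hw hs, pv_range_mul_nat,
    List.map_flatMap, List.flatMap_map]
  refine List.flatMap_congr (fun d _ => ?_)
  rw [List.map_map, List.map_map]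
  refine List.map_congr_left (fun m _ => ?_)
  simp only [Function.comp_apply]
  push_cast [Int.toNat_of_nonneg hs]
  ring

theorem pv_map_decode (w : Int) (hw : 0 ≤ w) (k : Nat) : ∀ p : List Int,
    (PySem.List.pyRange 0 (w ^ k) 1).map (fun n => p ++ (pvLsd k n w).reverse) = pvCombos w k p := by
  induction k with
  | zero =>
    intro p
    simp [PySem.List.pyRange_one, pvLsd, pvCombos, List.range_succ]
  | succ k ih =>
    intro p
    rcases (by omega : w = 0 ∨ 0 < w) with h0 | hpos
    · subst h0
      simp [pvCombos, zero_pow]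
    · have hwk : (0:Int) ≤ w ^ k := le_of_lt (pow_pos hpos k)
      rw [show w ^ (k+1) = w * w ^ k from pow_succ' w k, pv_pyRange_mul w (w ^ k) hw hwk,
        List.map_flatMap]
      show _ = pvCombos w (k+1) p
      rw [pvCombos]
      refine List.flatMap_congr (fun d hd => ?_)
      have hdb := (PySem.List.mem_pyRange_one).1 hd
      rw [List.map_map]
      rw [show (fun n => p ++ (pvLsd (k+1) n w).reverse) ∘ (fun m => d * w ^ k + m)
            = fun m => p ++ (pvLsd (k+1) (d * w ^ k + m) w).reverse from rfl]
      have : ∀ m ∈ PySem.List.pyRange 0 (w ^ k) 1,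
          p ++ (pvLsd (k+1) (d * w ^ k + m) w).reverse
            = (p ++ [d]) ++ (pvLsd k m w).reverse := by
        intro m hm
        have hmb := (PySem.List.mem_pyRange_one).1 hm
        rw [pv_lsd_split w hpos k d m hdb.1 hdb.2 hmb.1 hmb.2, List.reverse_append]
        simp
      rw [List.map_congr_left this, ih (p ++ [d])]

theorem pv_pyRange_max (lv : Int) : PySem.List.pyRange 0 lv 1 = PySem.List.pyRange 0 (max lv 0) 1 := by
  rcases (by omega : lv ≤ 0 ∨ 0 < lv) with h | h
  · rw [PySem.List.pyRange_one_eq_nil h, PySem.List.pyRange_one_eq_nil (le_of_eq (max_eq_right h))]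
  · rw [max_eq_left (le_of_lt h)]

theorem pv_aux_eq (lv ce : Int) (k : Nat) : ∀ (out : List (List Int)) (p : List Int),
    xigAux k lv (k : Int) ce out p =
      if ((p.length : Int) + k = ce) then out ++ pvCombos (max lv 0) k p else out := by
  induction k with
  | zero =>
    intro out p
    simp [xigAux, pvCombos]
  | succ k ih =>
    intro out p
    have hne : ((k+1 : Nat) : Int) ≠ 0 := by push_cast; omega
    rw [show ((k+1 : Nat) : Int) = (k : Int) + 1 from by push_cast; ring]
    rw [xigAux, if_neg (by push_cast; omega : ¬ ((k : Int) + 1 = 0))]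
    rw [show (k : Int) + 1 - 1 = (k : Int) from by ring]
    rw [pv_pyRange_max lv]
    by_cases hc : ((p.length : Int) + ((k : Int) + 1) = ce)
    · rw [if_pos hc]
      have hfun : (fun out digit =>
            xigAux k lv (k : Int) ce out (p ++ [digit]))
          = fun (o : List (List Int)) (d : Int) => o ++ pvCombos (max lv 0) k (p ++ [d]) := by
        funext o d
        rw [ih o (p ++ [d]), if_pos (by push_cast at hc ⊢; simp; omega)]
      rw [hfun, PySem.List.foldl_append_eq_flatMap]
      rfl
    · rw [if_neg hc]
      have hfun : (fun out digit =>
            xigAux k lv (k : Int) ce out (p ++ [digit]))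
          = fun (o : List (List Int)) (_ : Int) => o := by
        funext o d
        rw [ih o (p ++ [d]), if_neg (by push_cast at hc ⊢; simp; omega)]
      rw [hfun, pv_foldl_const]

-- ===== VERDICT (by name: the statement is the Claim_ definition above) =====
theorem x_input_generator_spec : Claim_equal_x_input_generator := by
  intro lv vc ce out pre _dom hpre
  unfold Pre_x_input_generator at hpre
  unfold Spec_x_input_generator x_input_generator x_input_generator_alt
  by_cases hvc : 0 ≤ vc
  · obtain ⟨k, rfl⟩ : ∃ k : Nat, vc = (k : Int) := ⟨vc.toNat, (Int.toNat_of_nonneg hvc).symm⟩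
    simp only [Int.toNat_natCast]
    rw [pv_aux_eq]
    by_cases hc : (((pre.getD []).length : Int) + k = ce)
    · rw [if_pos hc, if_neg (by push_cast; omega)]
      have hfun : (fun (o : List (List Int)) (n : Int) =>
            let st := (List.range k).foldl
              (fun (st : Int × List Int) _ =>
                (PySem.Int.floordiv st.1 (max lv 0), st.2 ++ [PySem.Int.mod st.1 (max lv 0)]))
              (n, [])
            o ++ [pre.getD [] ++ st.2.reverse])
          = fun (o : List (List Int)) (n : Int) =>
              o ++ [pre.getD [] ++ (pvLsd k n (max lv 0)).reverse] := by
        funext o n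
        show o ++ [pre.getD [] ++ (((List.range k).foldl _ (n, [])).2).reverse] = _
        rw [pv_fold_lsd (max lv 0) k n []]
        rfl
      rw [hfun, PySem.List.foldl_append_eq_flatMap,
        show (List.flatMap (fun n => [pre.getD [] ++ (pvLsd k n (max lv 0)).reverse])
            (PySem.List.pyRange 0 ((max lv 0) ^ k) 1))
          = (PySem.List.pyRange 0 ((max lv 0) ^ k) 1).map
              (fun n => pre.getD [] ++ (pvLsd k n (max lv 0)).reverse)
          from (List.map_eq_flatMap ..).symm,
        pv_map_decode (max lv 0) (le_max_right lv 0) k]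
    · rw [if_neg hc, if_pos (Or.inr (by push_cast at hc ⊢; omega))]
  · have hvc' : vc < 0 := by omega
    rw [show vc.toNat = 0 from by omega, xigAux, if_neg (by omega), if_pos (Or.inl hvc')]
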